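-- pv_equiv track=rewrite | github.com/mmswflow-upb/Bioinformatics | Project_L8/L8/ex2.py | build_color_map_terminal
-- ===== SOURCE A (Python) =====
-- from typing import Dict, List, Tuple, Optional
--
-- TE_ANSI_COLORS: Dict[str, str] = {
--     "TE1": "\033[91m",  # red
--     "TE2": "\033[92m",  # green
--     "TE3": "\033[94m",  # blue
--     "TE4": "\033[95m",  # magenta
-- }
--
-- def build_color_map_terminal(
--     seq_len: int,
--     hits: List[Tuple[str, int, int]],
-- ) -> List[Optional[str]]:
--     """
--     For each position in the sequence, decide which ANSI color (if any) to apply.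
--     """
--     color_for_pos: List[Optional[str]] = [None] * seq_len
--
--     for name, start1, end1 in hits:
--         color = TE_ANSI_COLORS.get(name)
--         if color is None:
--             continue
--         start0 = start1 - 1
--         end0 = end1
--         for i in range(start0, end0):
--             if 0 <= i < seq_len:
--                 color_for_pos[i] = color
--
--     return color_for_pos
-- ===== SOURCE B (Python) =====
-- from typing import Dict, List, Tuple, Optional
--
-- TE_ANSI_COLORS: Dict[str, str] = {
--     "TE1": "\033[91m",  # red
--     "TE2": "\033[92m",  # green
--     "TE3": "\033[94m",  # blue
--     "TE4": "\033[95m",  # magenta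
-- }
--
-- def build_color_map_terminal(
--     seq_len: int,
--     hits: List[Tuple[str, int, int]],
-- ) -> List[Optional[str]]:
--     # Coordinate compression: cut [0, n) at every (clamped) hit boundary into
--     # elementary segments; on each segment the winning color is constant, so it
--     # is found once per segment (first covering hit scanning colored hits in
--     # reverse) and the segment is emitted as a block.
--     n = max(seq_len, 0)
--     colored = [(s - 1, e, TE_ANSI_COLORS[name])
--                for name, s, e in hits if name in TE_ANSI_COLORS]
--     cuts = {0, n}
--     for s0, e, _ in colored:
--         cuts.add(min(max(s0, 0), n))
--         cuts.add(min(max(e, 0), n))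
--     bounds = sorted(cuts)
--     out: List[Optional[str]] = []
--     for a, b in zip(bounds, bounds[1:]):
--         c: Optional[str] = None
--         for s0, e, col in reversed(colored):
--             if s0 <= a < e:
--                 c = col
--                 break
--         out.extend([c] * (b - a))
--     return out
-- ===== Notes on version B (the rewrite author's own statement) =====
-- stated objective: alternative
-- what changed: A's hit-major repeated in-place painting of every covered cell (last write wins) is replaced by coordinate compression: the range is cut at clamped hit boundaries into elementary segments, each segment's color is decided once by scanning the colored hits in reverse, and emitted as a block.
import Mathlib
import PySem

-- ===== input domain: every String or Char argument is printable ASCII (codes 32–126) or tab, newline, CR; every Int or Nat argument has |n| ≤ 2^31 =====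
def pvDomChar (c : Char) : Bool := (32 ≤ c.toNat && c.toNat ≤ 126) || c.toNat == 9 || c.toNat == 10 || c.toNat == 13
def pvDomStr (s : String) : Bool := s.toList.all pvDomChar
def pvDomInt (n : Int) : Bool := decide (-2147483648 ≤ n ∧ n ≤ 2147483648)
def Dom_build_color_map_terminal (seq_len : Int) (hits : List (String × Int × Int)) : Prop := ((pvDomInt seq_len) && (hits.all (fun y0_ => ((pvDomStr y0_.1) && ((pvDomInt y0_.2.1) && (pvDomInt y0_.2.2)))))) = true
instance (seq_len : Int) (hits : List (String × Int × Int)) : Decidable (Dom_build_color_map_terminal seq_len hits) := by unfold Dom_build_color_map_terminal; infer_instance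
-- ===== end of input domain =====

-- B replaces A's hit-major in-place interval painting (last write wins) by
-- coordinate compression: the range is cut at the clamped hit boundaries into
-- elementary segments, each segment's winning color is found once (first
-- covering colored hit in reverse hit order) and emitted as a block.

-- ===== PORT A =====
def teColors : PySem.Dict String String :=
  PySem.Dict.ofList [("TE1", "\x1b[91m"), ("TE2", "\x1b[92m"), ("TE3", "\x1b[94m"), ("TE4", "\x1b[95m")]

def paintPos (seq_len : Int) (color : String) (a : List (Option String)) (i : Int) : List (Option String) :=
  if 0 ≤ i ∧ i < seq_len then a.set i.toNat (some color) else a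

def paintHit (seq_len : Int) (acc : List (Option String)) (h : String × Int × Int) : List (Option String) :=
  match PySem.Dict.get? teColors h.1 with
  | none => acc
  | some color => (PySem.List.pyRange (h.2.1 - 1) h.2.2 1).foldl (paintPos seq_len color) acc

def build_color_map_terminal (seq_len : Int) (hits : List (String × Int × Int)) : List (Option String) :=
  hits.foldl (paintHit seq_len) (List.replicate seq_len.toNat none)

-- ===== PORT B =====
-- min(max(x, 0), n)
def clampTo (n x : Int) : Int := min (max x 0) n

-- [(s - 1, e, TE_ANSI_COLORS[name]) for name, s, e in hits if name in TE_ANSI_COLORS]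
def coloredHits (hits : List (String × Int × Int)) : List (Int × Int × String) :=
  hits.filterMap (fun h => (PySem.Dict.get? teColors h.1).map (fun c => (h.2.1 - 1, h.2.2, c)))

-- first covering triple in the given (already reversed) colored list
def segColor : List (Int × Int × String) → Int → Option String
  | [], _ => none
  | (s0, e, col) :: rest, a => if s0 ≤ a ∧ a < e then some col else segColor rest a

def build_color_map_terminal_alt (seq_len : Int) (hits : List (String × Int × Int)) : List (Option String) :=
  let n : Int := max seq_len 0
  let colored := coloredHits hits
  -- cuts = {0, n}; for s0, e, _ in colored: cuts.add(clamp(s0)); cuts.add(clamp(e))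
  let cuts : List Int :=
    colored.foldl (fun s t => PySem.Set.add (PySem.Set.add s (clampTo n t.1)) (clampTo n t.2.1))
      (PySem.Set.ofList [0, n])
  let bounds := PySem.List.sorted cuts (fun x => x) false
  -- for a, b in zip(bounds, bounds[1:]): out.extend([segcolor] * (b - a))
  ((bounds.zip (PySem.List.slice bounds (some 1) none)).foldl
    (fun out p => out ++ List.replicate (p.2 - p.1).toNat (segColor colored.reverse p.1)) [])

-- ===== PRECONDITION & SPEC =====
def Spec_build_color_map_terminal (seq_len : Int) (hits : List (String × Int × Int)) (out : List (Option String)) : Prop := out = build_color_map_terminal_alt seq_len hits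
instance (seq_len : Int) (hits : List (String × Int × Int)) (out : List (Option String)) : Decidable (Spec_build_color_map_terminal seq_len hits out) := by unfold Spec_build_color_map_terminal; infer_instance

-- ===== CLAIM (what is proved, stated in full; the proofs are below) =====
def Claim_equal_build_color_map_terminal : Prop := ∀ (seq_len : Int) (hits : List (String × Int × Int)), Dom_build_color_map_terminal seq_len hits → Spec_build_color_map_terminal seq_len hits (build_color_map_terminal seq_len hits)

-- ===== LEMMAS AND PROOFS =====

-- characterisation of A's painting loops, proved via this helper
def lastCoverColor (hitsRev : List (String × Int × Int)) (i : Int) : Option String :=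
  match hitsRev with
  | [] => none
  | (name, s, e) :: rest =>
    if (s - 1 ≤ i ∧ i < e) ∧ (PySem.Dict.get? teColors name).isSome
    then PySem.Dict.get? teColors name
    else lastCoverColor rest i

lemma paint_len (n : Int) (c : String) :
    ∀ (l : List Int) (acc : List (Option String)),
      (l.foldl (paintPos n c) acc).length = acc.length := by
  intro l
  induction l with
  | nil => intro acc; rfl
  | cons j rest ih =>
      intro acc
      simp only [List.foldl_cons, ih, paintPos]
      split_ifs <;> simp

lemma paintHit_len (n : Int) (acc : List (Option String)) (h : String × Int × Int) :
    (paintHit n acc h).length = acc.length := by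
  unfold paintHit
  cases PySem.Dict.get? teColors h.1 with
  | none => rfl
  | some c => exact paint_len n c _ acc

lemma foldl_paintHit_len (n : Int) :
    ∀ (hits : List (String × Int × Int)) (acc : List (Option String)),
      (hits.foldl (paintHit n) acc).length = acc.length := by
  intro hits
  induction hits with
  | nil => intro acc; rfl
  | cons h rest ih => intro acc; simp [List.foldl_cons, ih, paintHit_len]

lemma paint_get (n : Int) (c : String) :
    ∀ (l : List Int) (acc : List (Option String)) (i : Nat), i < acc.length →
      (l.foldl (paintPos n c) acc)[i]? =
        (if (i : Int) ∈ l ∧ (i : Int) < n then some (some c) else acc[i]?) := by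
  intro l
  induction l with
  | nil => intro acc i hi; simp
  | cons j rest ih =>
      intro acc i hi
      have hlen : (paintPos n c acc j).length = acc.length := by
        unfold paintPos; split_ifs <;> simp
      rw [List.foldl_cons, ih (paintPos n c acc j) i (by omega)]
      by_cases hrest : (i : Int) ∈ rest ∧ (i : Int) < n
      · simp [hrest, List.mem_cons]
      · have hr : ((i : Int) ∈ j :: rest ∧ (i : Int) < n) ↔ ((i : Int) = j ∧ (i : Int) < n) := by
          constructor
          · rintro ⟨hm, hn⟩
            rcases List.mem_cons.mp hm with h | h
            · exact ⟨h, hn⟩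
            · exact absurd ⟨h, hn⟩ hrest
          · rintro ⟨he, hn⟩; exact ⟨List.mem_cons.mpr (Or.inl he), hn⟩
        rw [if_neg hrest, if_congr hr rfl rfl]
        unfold paintPos
        by_cases hij : (i : Int) = j ∧ (i : Int) < n
        · rw [if_pos hij]
          have hj : (0 ≤ j ∧ j < n) := by omega
          rw [if_pos hj]
          have : j.toNat = i := by omega
          rw [this, List.getElem?_set_self (by omega)]
        · rw [if_neg hij]
          by_cases hj : 0 ≤ j ∧ j < n
          · rw [if_pos hj]
            have hne : j.toNat ≠ i := by omega
            rw [List.getElem?_set_ne hne]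
          · rw [if_neg hj]

lemma lastCoverColor_append (l1 l2 : List (String × Int × Int)) (i : Int) :
    lastCoverColor (l1 ++ l2) i = (lastCoverColor l1 i).or (lastCoverColor l2 i) := by
  induction l1 with
  | nil => simp [lastCoverColor]
  | cons h rest ih =>
      obtain ⟨name, s, e⟩ := h
      simp only [List.cons_append, lastCoverColor, ih]
      split_ifs with hc
      · cases hget : PySem.Dict.get? teColors name with
        | none => simp [hget] at hc
        | some c => simp
      · rfl

lemma foldl_paintHit_get (n : Int) :
    ∀ (hits : List (String × Int × Int)) (acc : List (Option String)) (i : Nat),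
      i < acc.length → (i : Int) < n →
      (hits.foldl (paintHit n) acc)[i]? =
        ((lastCoverColor hits.reverse (i : Int)).elim acc[i]? (fun c => some (some c))) := by
  intro hits
  induction hits with
  | nil => intro acc i hi hn; simp [lastCoverColor]
  | cons h rest ih =>
      intro acc i hi hn
      rw [List.foldl_cons, ih (paintHit n acc h) i (by rw [paintHit_len]; exact hi) hn]
      rw [List.reverse_cons, lastCoverColor_append]
      cases hr : lastCoverColor rest.reverse (i : Int) with
      | some c => simp
      | none =>
          simp only [Option.none_or, Option.elim]
          obtain ⟨name, s, e⟩ := h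
          unfold paintHit lastCoverColor
          cases hget : PySem.Dict.get? teColors name with
          | none => simp [lastCoverColor]
          | some c =>
              simp only [Option.isSome_some, and_true]
              rw [paint_get n c _ acc i hi]
              by_cases hcov : s - 1 ≤ (i : Int) ∧ (i : Int) < e
              · rw [if_pos hcov, if_pos ⟨PySem.List.mem_pyRange_one.mpr hcov, hn⟩]
              · rw [if_neg hcov,
                    if_neg (fun hx => hcov (PySem.List.mem_pyRange_one.mp hx.1))]
                simp [lastCoverColor]

-- bridge: A's last-covering-colored-hit scan equals B's scan of the filtered list
lemma lastCoverColor_eq_segColor :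
    ∀ (l : List (String × Int × Int)) (i : Int),
      lastCoverColor l i = segColor (coloredHits l) i := by
  intro l
  induction l with
  | nil => intro i; rfl
  | cons h rest ih =>
      intro i
      obtain ⟨name, s, e⟩ := h
      unfold lastCoverColor coloredHits
      rw [List.filterMap_cons]
      cases hget : PySem.Dict.get? teColors name with
      | none => simpa [hget] using ih i
      | some c =>
          simp only [Option.map_some, Option.isSome_some, and_true]
          unfold segColor
          split_ifs <;> [rfl; exact ih i]

lemma coloredHits_reverse (l : List (String × Int × Int)) :
    coloredHits l.reverse = (coloredHits l).reverse := by
  unfold coloredHits; rw [List.filterMap_reverse]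

-- pairs of zip(bs, bs.tail) of a Pairwise-< list are increasing
lemma zip_tail_lt :
    ∀ (bs : List Int), bs.Pairwise (· < ·) →
      ∀ p ∈ bs.zip bs.tail, p.1 < p.2 := by
  intro bs
  induction bs with
  | nil => intro _ p hp; simp at hp
  | cons c t ih =>
      intro hpw p hp
      cases t with
      | nil => simp at hp
      | cons d t' =>
          rcases List.mem_cons.mp hp with h | h
          · subst h; exact (List.pairwise_cons.mp hpw).1 d (by simp)
          · exact ih (List.pairwise_cons.mp hpw).2 p h

-- no element of a Pairwise-< list lies strictly between a consecutive pair
lemma zip_tail_gap :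
    ∀ (bs : List Int), bs.Pairwise (· < ·) →
      ∀ p ∈ bs.zip bs.tail, ∀ y ∈ bs, y ≤ p.1 ∨ p.2 ≤ y := by
  intro bs
  induction bs with
  | nil => intro _ p hp; simp at hp
  | cons c t ih =>
      intro hpw p hp y hy
      obtain ⟨hc, hpw'⟩ := List.pairwise_cons.mp hpw
      cases t with
      | nil => simp at hp
      | cons d t' =>
          rcases List.mem_cons.mp hp with h | h
          · subst h
            rcases List.mem_cons.mp hy with h | h
            · exact Or.inl (le_of_eq h)
            · rcases List.mem_cons.mp h with h | h
              · exact Or.inr (le_of_eq h.symm)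
              · exact Or.inr (le_of_lt ((List.pairwise_cons.mp hpw').1 y h))
          · rcases List.mem_cons.mp hy with h' | h'
            · left
              have h1 : p.1 ∈ d :: t' := (List.of_mem_zip h).1
              subst h'
              exact le_of_lt (hc p.1 h1)
            · exact ih hpw' p h y h'

-- the last element of a Pairwise-< cons list bounds every element
lemma getLastD_ge :
    ∀ (rest : List Int) (a : Int), (a :: rest).Pairwise (· < ·) →
      ∀ y ∈ a :: rest, y ≤ rest.getLastD a := by
  intro rest
  induction rest with
  | nil => intro a _ y hy; simp at hy; simp [hy]
  | cons b rest' ih =>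
      intro a hpw y hy
      obtain ⟨ha, hpw'⟩ := List.pairwise_cons.mp hpw
      have hb := ih b hpw'
      rw [List.getLastD_cons]
      rcases List.mem_cons.mp hy with h | h
      · subst h
        exact le_of_lt (lt_of_lt_of_le (ha b (by simp)) (hb b (by simp)))
      · exact hb y h

-- the segment-emission loop over consecutive bounds builds the per-position map
lemma seg_build (f : Int → Option String) :
    ∀ (rest : List Int) (a : Int), (a :: rest).Pairwise (· < ·) →
      (∀ p ∈ (a :: rest).zip rest, ∀ x, p.1 ≤ x → x < p.2 → f x = f p.1) →
      ((a :: rest).zip rest).flatMap (fun p => List.replicate (p.2 - p.1).toNat (f p.1)) =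
        (PySem.List.pyRange a (rest.getLastD a) 1).map f := by
  intro rest
  induction rest with
  | nil =>
      intro a _ _
      simp [PySem.List.pyRange_one_eq_nil (le_refl a)]
  | cons b rest' ih =>
      intro a hpw hconst
      obtain ⟨ha, hpw'⟩ := List.pairwise_cons.mp hpw
      have hab : a < b := ha b (by simp)
      have hbl : b ≤ rest'.getLastD b := getLastD_ge rest' b hpw' b (by simp)
      rw [List.getLastD_cons,
          PySem.List.pyRange_one_append a b (rest'.getLastD b) (le_of_lt hab) hbl,
          List.map_append]
      have hzip : ((a :: b :: rest').zip (b :: rest')) =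
          (a, b) :: ((b :: rest').zip rest') := rfl
      rw [hzip, List.flatMap_cons,
          ih b hpw' (fun p hp => hconst p (List.mem_cons.mpr (Or.inr hp)))]
      congr 1
      have hc := hconst (a, b) (by simp)
      symm
      rw [List.eq_replicate_iff]
      refine ⟨by simp [PySem.List.length_pyRange_one], ?_⟩
      intro y hy
      rcases List.mem_map.mp hy with ⟨x, hx, rfl⟩
      obtain ⟨h1, h2⟩ := PySem.List.mem_pyRange_one.mp hx
      exact hc x h1 h2

-- segColor is constant on an elementary segment
lemma segColor_const (n a b : Int) (bounds : List Int)
    (hgap : ∀ y ∈ bounds, y ≤ a ∨ b ≤ y) (ha : 0 ≤ a) (hb : b ≤ n) (hab : a < b) :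
    ∀ (l : List (Int × Int × String)),
      (∀ t ∈ l, clampTo n t.1 ∈ bounds ∧ clampTo n t.2.1 ∈ bounds) →
      ∀ x, a ≤ x → x < b → segColor l x = segColor l a := by
  intro l
  induction l with
  | nil => intro _ x _ _; rfl
  | cons t rest ih =>
      intro hmem x hax hxb
      obtain ⟨s0, e, col⟩ := t
      have g1 := hgap _ (hmem (s0, e, col) (by simp)).1
      have g2 := hgap _ (hmem (s0, e, col) (by simp)).2
      simp only [clampTo] at g1 g2
      unfold segColor
      have hiff : (s0 ≤ x ∧ x < e) ↔ (s0 ≤ a ∧ a < e) := by omega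
      rw [if_congr hiff rfl rfl]
      split_ifs
      · rfl
      · exact ih (fun t ht => hmem t (List.mem_cons.mpr (Or.inr ht))) x hax hxb

-- ===== VERDICT (by name: the statement is the Claim_ definition above) =====
theorem build_color_map_terminal_spec : Claim_equal_build_color_map_terminal := by
  intro seq_len hits _
  unfold Spec_build_color_map_terminal build_color_map_terminal build_color_map_terminal_alt
  simp only []
  set n : Int := max seq_len 0 with hn
  have hn0 : 0 ≤ n := le_max_right _ _
  set colored := coloredHits hits with hcol
  set cuts : List Int :=
    colored.foldl (fun s t => PySem.Set.add (PySem.Set.add s (clampTo n t.1)) (clampTo n t.2.1))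
      (PySem.Set.ofList [0, n]) with hcuts
  -- membership and nodup facts about cuts
  have hcuts_nd : cuts.Nodup := by
    rw [hcuts]
    have : ∀ (l : List (Int × Int × String)) (s : List Int), s.Nodup →
        (l.foldl (fun s t => PySem.Set.add (PySem.Set.add s (clampTo n t.1)) (clampTo n t.2.1)) s).Nodup := by
      intro l
      induction l with
      | nil => intro s hs; exact hs
      | cons t rest ih =>
          intro s hs
          exact ih _ (PySem.Set.nodup_add _ _ (PySem.Set.nodup_add _ _ hs))
    exact this colored _ (PySem.Set.nodup_ofList _)
  have hcuts_mem : ∀ y, y ∈ cuts ↔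
      (y = 0 ∨ y = n ∨ ∃ t ∈ colored, y = clampTo n t.1 ∨ y = clampTo n t.2.1) := by
    intro y
    rw [hcuts]
    have : ∀ (l : List (Int × Int × String)) (s : List Int),
        (y ∈ l.foldl (fun s t => PySem.Set.add (PySem.Set.add s (clampTo n t.1)) (clampTo n t.2.1)) s ↔
          y ∈ s ∨ ∃ t ∈ l, y = clampTo n t.1 ∨ y = clampTo n t.2.1) := by
      intro l
      induction l with
      | nil => intro s; simp
      | cons t rest ih =>
          intro s
          rw [List.foldl_cons, ih]
          simp only [PySem.Set.mem_add, List.mem_cons]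
          constructor
          · rintro (((h | h) | h) | ⟨t', ht', h⟩)
            · exact Or.inl h
            · exact Or.inr ⟨t, Or.inl rfl, Or.inl h⟩
            · exact Or.inr ⟨t, Or.inl rfl, Or.inr h⟩
            · exact Or.inr ⟨t', Or.inr ht', h⟩
          · rintro (h | ⟨t', (rfl | ht'), h⟩)
            · exact Or.inl (Or.inl (Or.inl h))
            · rcases h with h | h
              · exact Or.inl (Or.inl (Or.inr h))
              · exact Or.inl (Or.inr h)
            · exact Or.inr ⟨t', ht', h⟩
    rw [this]
    simp [PySem.Set.mem_ofList, or_assoc]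
  set bounds := PySem.List.sorted cuts (fun x => x) false with hbounds
  have hperm : bounds.Perm cuts := PySem.List.sorted_perm cuts (fun x => x) false
  have hb_mem : ∀ y, (y ∈ bounds ↔ y ∈ cuts) := fun y => hperm.mem_iff
  have hb_nd : bounds.Nodup := (hperm.nodup_iff).mpr hcuts_nd
  have hb_le : bounds.Pairwise (fun a b => a ≤ b) := by
    have := PySem.List.sorted_pairwise cuts (fun x => x)
    simpa using this
  have hb_lt : bounds.Pairwise (· < ·) := by
    have h := List.Pairwise.and hb_le hb_nd
    exact h.imp (fun hx => lt_of_le_of_ne hx.1 hx.2)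
  have hrange : ∀ y ∈ bounds, 0 ≤ y ∧ y ≤ n := by
    intro y hy
    rcases (hcuts_mem y).mp ((hb_mem y).mp hy) with rfl | rfl | ⟨t, _, h | h⟩ <;>
      simp only [clampTo] at * <;> omega
  have h0 : (0 : Int) ∈ bounds := (hb_mem 0).mpr ((hcuts_mem 0).mpr (Or.inl rfl))
  have hnmem : n ∈ bounds := (hb_mem n).mpr ((hcuts_mem n).mpr (Or.inr (Or.inl rfl)))
  -- bounds is nonempty with head 0 and last n
  obtain ⟨a, rest, hbr⟩ : ∃ a rest, bounds = a :: rest := by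
    cases hbe : bounds with
    | nil => rw [hbe] at h0; simp at h0
    | cons a rest => exact ⟨a, rest, rfl⟩
  have ha0 : a = 0 := by
    rw [hbr] at hb_lt h0 hrange
    obtain ⟨hhead, _⟩ := List.pairwise_cons.mp hb_lt
    rcases List.mem_cons.mp h0 with h | h
    · omega
    · have := hhead 0 h
      have := (hrange a (by simp)).1
      omega
  have hlast : rest.getLastD a = n := by
    rw [hbr] at hb_lt hnmem hrange
    have h1 := getLastD_ge rest a hb_lt n hnmem
    have h2 := (hrange (rest.getLastD a) List.getLastD_mem_cons).2
    omega
  -- rewrite B's loop as the per-position map over [0, n)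
  rw [PySem.List.slice_from_one, PySem.List.foldl_append_eq_flatMap, List.nil_append, hbr]
  have htail : (a :: rest).tail = rest := rfl
  rw [htail]
  have hconst : ∀ p ∈ (a :: rest).zip rest, ∀ x, p.1 ≤ x → x < p.2 →
      segColor colored.reverse x = segColor colored.reverse p.1 := by
    intro p hp x h1 h2
    have hpab := zip_tail_lt (a :: rest) (hbr ▸ hb_lt) p hp
    have hgap := zip_tail_gap (a :: rest) (hbr ▸ hb_lt) p hp
    have hp1 : p.1 ∈ a :: rest := (List.of_mem_zip hp).1
    have hp2 : p.2 ∈ rest := (List.of_mem_zip hp).2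
    have hr1 := (hbr ▸ hrange) p.1 hp1
    have hr2 := (hbr ▸ hrange) p.2 (List.mem_cons.mpr (Or.inr hp2))
    refine segColor_const n p.1 p.2 (a :: rest) hgap hr1.1 hr2.2 hpab colored.reverse ?_ x h1 h2
    intro t ht
    have ht' : t ∈ colored := List.mem_reverse.mp ht
    constructor
    · exact (hbr ▸ (hb_mem _)).mpr ((hcuts_mem _).mpr (Or.inr (Or.inr ⟨t, ht', Or.inl rfl⟩)))
    · exact (hbr ▸ (hb_mem _)).mpr ((hcuts_mem _).mpr (Or.inr (Or.inr ⟨t, ht', Or.inr rfl⟩)))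
  rw [seg_build (segColor colored.reverse) rest a (hbr ▸ hb_lt) hconst, hlast, ha0]
  -- compare A with the per-position map, index by index
  apply List.ext_getElem?
  intro i
  have hnn : n.toNat = seq_len.toNat := by omega
  by_cases hi : i < seq_len.toNat
  · rw [foldl_paintHit_get seq_len hits (List.replicate seq_len.toNat none) i
        (by simpa using hi) (by omega),
        List.getElem?_replicate_of_lt hi,
        PySem.List.pyRange_one]
    rw [List.map_map, List.getElem?_map, List.getElem?_range (by omega : i < (n - 0).toNat),
        Option.map_some]
    have hbridge : lastCoverColor hits.reverse (i : Int) = segColor colored.reverse (i : Int) := by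
      rw [hcol, ← coloredHits_reverse, ← lastCoverColor_eq_segColor]
    simp only [Function.comp_apply, zero_add]
    rw [hbridge]
    rcases segColor colored.reverse (i : Int) with _ | c <;> rfl
  · have h1 : (hits.foldl (paintHit seq_len) (List.replicate seq_len.toNat none))[i]? = none := by
      rw [List.getElem?_eq_none_iff, foldl_paintHit_len]; simpa using hi
    rw [h1]
    symm
    rw [List.getElem?_eq_none_iff, List.length_map, PySem.List.length_pyRange_one]
    omega
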